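-- pv_equiv track=rewrite | github.com/lewinskie254/apps | chess.py | getChessSquareColor
-- ===== SOURCE A (Python) =====
-- def getChessSquareColor(x, y):
--     x += 1
--     y += 1
--     for i in range(9):
--         numberY = i
--         for j in range(9):
--             numberX = j + 1
--             sum = numberX + numberY
--             color = ''
--             if sum % 2 == 0:
--                 color= 'white'
--             else:
--                 color = 'black'
--             if x == numberX and y == numberY:
--                 return color
-- ===== SOURCE B (Python) =====
-- def getChessSquareColor(x, y):
--     if 0 <= x <= 7 and 0 <= y <= 7:
--         return 'white' if (x + y) % 2 == 0 else 'black'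
-- ===== Notes on version B (the rewrite author's own statement) =====
-- stated objective: simpler
-- what changed: Replaces the 9x9 nested search with a direct 8x8 board check and the parity closed form (x+y) % 2, no loops.
-- intended difference: On off-board coordinates A accidentally accepts (x = 8 with -1 <= y <= 7, or y = -1 with 0 <= x <= 8, an off-by-one from its two += 1 shifts), A returns a color string while B returns None, the intended value for a square not on the 8x8 board. — e.g. on getChessSquareColor(8, 0): A returns some "white", B returns none
import Mathlib
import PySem

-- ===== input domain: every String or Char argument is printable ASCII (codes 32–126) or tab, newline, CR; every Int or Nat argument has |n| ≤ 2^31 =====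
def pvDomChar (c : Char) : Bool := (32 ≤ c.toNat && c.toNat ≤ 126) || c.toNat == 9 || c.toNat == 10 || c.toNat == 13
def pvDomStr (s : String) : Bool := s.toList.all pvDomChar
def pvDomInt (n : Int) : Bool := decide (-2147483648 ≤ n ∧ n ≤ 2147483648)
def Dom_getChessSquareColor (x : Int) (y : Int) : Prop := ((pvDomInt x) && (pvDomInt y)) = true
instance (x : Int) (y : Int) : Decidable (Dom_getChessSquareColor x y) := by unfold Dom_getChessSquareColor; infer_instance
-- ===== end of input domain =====

-- B replaces A's 9×9 nested search with a direct 8×8 board check plus the parity closed form;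
-- on A's accidental off-board row/column (see D_ below) B returns none instead of a color.

-- ===== PORT A =====
-- inner 'for j in range(9)' loop: returns some color on the first match, none if it falls through
def pvAInner (x y numberY : Int) : List Int → Option String
  | [] => none
  | j :: js =>
    let numberX := j + 1
    let sum := numberX + numberY
    let color := if PySem.Int.mod sum 2 = 0 then "white" else "black"
    if x = numberX ∧ y = numberY then some color else pvAInner x y numberY js

-- outer 'for i in range(9)' loop
def pvAOuter (x y : Int) : List Int → Option String
  | [] => none
  | i :: is =>
    match pvAInner x y i (PySem.List.pyRange 0 9 1) with
    | some c => some c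
    | none => pvAOuter x y is

def getChessSquareColor (x : Int) (y : Int) : Option String :=
  pvAOuter (x + 1) (y + 1) (PySem.List.pyRange 0 9 1)

-- ===== PORT B =====
def getChessSquareColor_alt (x : Int) (y : Int) : Option String :=
  if 0 ≤ x ∧ x ≤ 7 ∧ 0 ≤ y ∧ y ≤ 7 then
    some (if PySem.Int.mod (x + y) 2 = 0 then "white" else "black")
  else none

-- ===== PRECONDITION & SPEC =====
-- On off-board coordinates A accidentally accepts (x = 8 with -1 ≤ y ≤ 7, or y = -1 with
-- 0 ≤ x ≤ 8, an off-by-one from its two += 1 shifts) A returns a color string; B returns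
-- none, the intended value for a square not on the 8×8 board.
def D_getChessSquareColor (x : Int) (y : Int) : Prop :=
  (x = 8 ∧ -1 ≤ y ∧ y ≤ 7) ∨ (y = -1 ∧ 0 ≤ x ∧ x ≤ 8)
instance (x : Int) (y : Int) : Decidable (D_getChessSquareColor x y) := by unfold D_getChessSquareColor; infer_instance

def Spec_getChessSquareColor (x : Int) (y : Int) (out : Option String) : Prop :=
  ¬ D_getChessSquareColor x y → out = getChessSquareColor_alt x y
instance (x : Int) (y : Int) (out : Option String) : Decidable (Spec_getChessSquareColor x y out) := by unfold Spec_getChessSquareColor; infer_instance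

def pvDiffWitness_getChessSquareColor : Int × Int := (8, 0)
def pvDiffWitnessOut_getChessSquareColor : (Option String) × (Option String) := (some "white", none)

-- ===== CLAIM (what is proved, stated in full; the proofs are below) =====
def Claim_unchanged_getChessSquareColor : Prop := ∀ (x : Int) (y : Int), Dom_getChessSquareColor x y → Spec_getChessSquareColor x y (getChessSquareColor x y)
def Claim_changed_getChessSquareColor : Prop := Dom_getChessSquareColor (pvDiffWitness_getChessSquareColor.1) (pvDiffWitness_getChessSquareColor.2) ∧ D_getChessSquareColor (pvDiffWitness_getChessSquareColor.1) (pvDiffWitness_getChessSquareColor.2) ∧ getChessSquareColor (pvDiffWitness_getChessSquareColor.1) (pvDiffWitness_getChessSquareColor.2) = pvDiffWitnessOut_getChessSquareColor.1 ∧ getChessSquareColor_alt (pvDiffWitness_getChessSquareColor.1) (pvDiffWitness_getChessSquareColor.2) = pvDiffWitnessOut_getChessSquareColor.2 ∧ pvDiffWitnessOut_getChessSquareColor.1 ≠ pvDiffWitnessOut_getChessSquareColor.2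
def Claim_exact_getChessSquareColor : Prop := ∀ (x : Int) (y : Int), Dom_getChessSquareColor x y → D_getChessSquareColor x y → getChessSquareColor x y ≠ getChessSquareColor_alt x y

-- ===== LEMMAS AND PROOFS =====

lemma pvRange9 : PySem.List.pyRange 0 9 1 = [0,1,2,3,4,5,6,7,8] := by decide

lemma pvAInner_none (x y n : Int) (L : List Int)
    (h : ∀ j ∈ L, ¬(x = j + 1 ∧ y = n)) : pvAInner x y n L = none := by
  induction L with
  | nil => rfl
  | cons j js ih =>
    simp only [pvAInner]
    rw [if_neg (h j (by simp))]
    exact ih (fun k hk => h k (by simp [hk]))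

lemma pvAOuter_none (x y : Int) (L : List Int)
    (h : ∀ i ∈ L, pvAInner x y i (PySem.List.pyRange 0 9 1) = none) :
    pvAOuter x y L = none := by
  induction L with
  | nil => rfl
  | cons i is ih =>
    simp only [pvAOuter]
    rw [h i (by simp)]
    exact ih (fun k hk => h k (by simp [hk]))

-- out of A's accepted region the search falls through and returns none
lemma pvA_none (x y : Int) (h : ¬ (0 ≤ x ∧ x ≤ 8 ∧ -1 ≤ y ∧ y ≤ 7)) :
    getChessSquareColor x y = none := by
  unfold getChessSquareColor
  refine pvAOuter_none _ _ _ (fun i hi => pvAInner_none _ _ _ _ (fun j hj => ?_))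
  rw [pvRange9] at hi hj
  simp only [List.mem_cons, List.not_mem_nil, or_false] at hi hj
  rintro ⟨hx, hy⟩
  omega

theorem getChessSquareColor_spec : Claim_unchanged_getChessSquareColor := by
  intro x y _ hD
  by_cases h : 0 ≤ x ∧ x ≤ 8 ∧ -1 ≤ y ∧ y ≤ 7
  · obtain ⟨h1, h2, h3, h4⟩ := h
    interval_cases x <;> interval_cases y <;> revert hD <;> decide
  · rw [pvA_none x y h]
    have hb : ¬ (0 ≤ x ∧ x ≤ 7 ∧ 0 ≤ y ∧ y ≤ 7) := by omega
    simp [getChessSquareColor_alt, hb]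

theorem getChessSquareColor_changed : Claim_changed_getChessSquareColor := by
  unfold Claim_changed_getChessSquareColor; decide

theorem getChessSquareColor_tight : Claim_exact_getChessSquareColor := by
  intro x y _ hD
  have h1 : 0 ≤ x := by unfold D_getChessSquareColor at hD; omega
  have h2 : x ≤ 8 := by unfold D_getChessSquareColor at hD; omega
  have h3 : -1 ≤ y := by unfold D_getChessSquareColor at hD; omega
  have h4 : y ≤ 7 := by unfold D_getChessSquareColor at hD; omega
  interval_cases x <;> interval_cases y <;> revert hD <;> decide
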